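-- pv_equiv track=rewrite | github.com/Giovix92/GTools-Mac | modules/mkssdt.py | get_device_paths_with_hid
-- ===== SOURCE A (Python) =====
-- def is_hex(line):
-- 	return ':' in line.split('//')[0]
--
-- def get_device_paths_with_hid(dsdt_lines, dsdt_paths, hid='ACPI000E'):
-- 	starting_indexes = []
-- 	for index,line in enumerate(dsdt_lines):
-- 		if is_hex(line): continue
-- 		if hid.upper() in line.upper():
-- 			starting_indexes.append(index)
-- 	if not starting_indexes: return starting_indexes
-- 	devices = []
-- 	for i in starting_indexes:
-- 		# Walk backwards and get the next parent device
-- 		pad = len(dsdt_lines[i]) - len(dsdt_lines[i].lstrip(' '))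
-- 		for sub,line in enumerate(dsdt_lines[i::-1]):
-- 			if 'Device (' in line and len(line)-len(line.lstrip(' ')) < pad:
-- 				# Add it if it's already in our dsdt_paths - if not, add the current line
-- 				device = next((x for x in dsdt_paths if x[1]==i-sub),None)
-- 				if device: devices.append(device)
-- 				else: devices.append((line,i-sub))
-- 				break
-- 	return devices
-- ===== SOURCE B (Python) =====
-- def is_hex(line):
-- 	return ':' in line.split('//')[0]
--
-- def get_device_paths_with_hid(dsdt_lines, dsdt_paths, hid='ACPI000E'):
-- 	# Single forward pass: maintain an index of the 'Device (' lines seen so far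
-- 	# and a first-wins dict of dsdt_paths keyed by index, instead of re-scanning
-- 	# the whole file backwards (and a full dsdt_paths scan) for every HID match.
-- 	H = hid.upper()
-- 	path_by_index = {}
-- 	for x in dsdt_paths:
-- 		path_by_index.setdefault(x[1], x)
-- 	device_stack = []  # (line, index, indent) for every line containing 'Device ('
-- 	out = []
-- 	for j, line in enumerate(dsdt_lines):
-- 		indent = len(line) - len(line.lstrip(' '))
-- 		if H in line.upper() and not is_hex(line):
-- 			for dline, dj, dindent in reversed(device_stack):
-- 				if dindent < indent:
-- 					out.append(path_by_index.get(dj, (dline, dj)))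
-- 					break
-- 		if 'Device (' in line:
-- 			device_stack.append((line, j, indent))
-- 	return out
-- ===== Notes on version B (the rewrite author's own statement) =====
-- stated objective: faster
-- what changed: B makes a single forward pass over the lines, maintaining an incrementally-built index of the 'Device (' lines seen so far (queried backwards per HID match) and a first-wins dict of dsdt_paths keyed by line index, instead of A's per-match full backward slice-and-rescan of all lines plus a linear dsdt_paths scan.
import Mathlib
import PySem

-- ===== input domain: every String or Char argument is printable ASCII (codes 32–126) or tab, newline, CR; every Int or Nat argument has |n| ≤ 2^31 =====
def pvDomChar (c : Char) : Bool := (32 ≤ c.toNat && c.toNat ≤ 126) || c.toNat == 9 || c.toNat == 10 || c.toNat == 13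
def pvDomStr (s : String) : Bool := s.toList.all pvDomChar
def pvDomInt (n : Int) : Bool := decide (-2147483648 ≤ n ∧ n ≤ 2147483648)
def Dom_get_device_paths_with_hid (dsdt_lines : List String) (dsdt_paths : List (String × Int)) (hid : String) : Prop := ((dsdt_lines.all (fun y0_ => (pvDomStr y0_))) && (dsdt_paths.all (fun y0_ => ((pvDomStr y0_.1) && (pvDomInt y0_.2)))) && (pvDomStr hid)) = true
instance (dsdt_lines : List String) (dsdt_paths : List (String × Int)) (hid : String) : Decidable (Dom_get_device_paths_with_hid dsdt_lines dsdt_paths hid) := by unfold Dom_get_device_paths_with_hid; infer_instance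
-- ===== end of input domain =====

-- B replaces A's per-match backward scan of the whole file (plus a linear dsdt_paths scan)
-- by one forward pass that maintains an index of the 'Device (' lines seen so far and a
-- first-wins dict of dsdt_paths keyed by index.

-- ===== PORT A =====
-- shared module helpers
-- line.lstrip(' '): drops exactly the leading ' ' characters (exact for a single-char strip set)
def pvLstripSp (l : List Char) : List Char := l.dropWhile (· == ' ')
-- len(line) - len(line.lstrip(' '))
def pvIndent (s : String) : Nat := s.toList.length - (pvLstripSp s.toList).length
-- is_hex(line) = ':' in line.split('//')[0]  (split on a non-empty separator always returns
-- a non-empty list, so [0] is its head)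
def pvIsHex (line : String) : Bool :=
  match PySem.Str.split? line "//" with
  | some parts => PySem.Str.isIn ":" (parts.headD "")
  | none => false  -- unreachable: separator "//" is non-empty
def pvIsDevice (line : String) : Bool := PySem.Str.isIn "Device (" line

def get_device_paths_with_hid (dsdt_lines : List String) (dsdt_paths : List (String × Int)) (hid : String) : List (String × Int) :=
  let starting_indexes : List Int :=
    (PySem.List.enumerate dsdt_lines 0).foldl
      (fun acc p =>
        if pvIsHex p.2 then acc
        else if PySem.Str.isIn (PySem.Str.upper hid) (PySem.Str.upper p.2) then acc ++ [p.1]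
        else acc) []
  if starting_indexes.isEmpty then [] else  -- Python returns the (empty) starting_indexes list here
  starting_indexes.foldl (fun devices i =>
    match PySem.List.pyGet? dsdt_lines i with
    | none => devices  -- unreachable: i comes from enumerate
    | some li =>
      let pad := pvIndent li
      match PySem.List.slice? dsdt_lines (some i) none (-1) with
      | none => devices  -- unreachable: step -1 ≠ 0
      | some rev =>
        match (PySem.List.enumerate rev 0).find?
            (fun q => pvIsDevice q.2 && decide (pvIndent q.2 < pad)) with
        | none => devices
        | some q =>
          match dsdt_paths.find? (fun x => x.2 == i - q.1) with
          | some device => devices ++ [device]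
          | none => devices ++ [(q.2, i - q.1)]) []

-- ===== PORT B =====
def get_device_paths_with_hid_alt (dsdt_lines : List String) (dsdt_paths : List (String × Int)) (hid : String) : List (String × Int) :=
  let H := PySem.Str.upper hid
  let path_by_index : PySem.Dict Int (String × Int) :=
    dsdt_paths.foldl (fun d x => d.setdefault x.2 x) PySem.Dict.empty
  let r := (PySem.List.enumerate dsdt_lines 0).foldl
    (fun st p =>
      let indent := pvIndent p.2
      let out :=
        if PySem.Str.isIn H (PySem.Str.upper p.2) && !pvIsHex p.2 then
          match st.1.reverse.find? (fun d => decide (d.2.2 < indent)) with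
          | some d => st.2 ++ [path_by_index.getD d.2.1 (d.1, d.2.1)]
          | none => st.2
        else st.2
      let devs := if pvIsDevice p.2 then st.1 ++ [(p.2, p.1, indent)] else st.1
      (devs, out))
    (([] : List (String × Int × Nat)), ([] : List (String × Int)))
  r.2

-- ===== PRECONDITION & SPEC =====
def Spec_get_device_paths_with_hid (dsdt_lines : List String) (dsdt_paths : List (String × Int)) (hid : String) (out : List (String × Int)) : Prop := out = get_device_paths_with_hid_alt dsdt_lines dsdt_paths hid
instance (dsdt_lines : List String) (dsdt_paths : List (String × Int)) (hid : String) (out : List (String × Int)) : Decidable (Spec_get_device_paths_with_hid dsdt_lines dsdt_paths hid out) := by unfold Spec_get_device_paths_with_hid; infer_instance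

-- ===== CLAIM (what is proved, stated in full; the proofs are below) =====
def Claim_equal_get_device_paths_with_hid : Prop := ∀ (dsdt_lines : List String) (dsdt_paths : List (String × Int)) (hid : String), Dom_get_device_paths_with_hid dsdt_lines dsdt_paths hid → Spec_get_device_paths_with_hid dsdt_lines dsdt_paths hid (get_device_paths_with_hid dsdt_lines dsdt_paths hid)

-- ===== LEMMAS AND PROOFS =====

-- A's per-match-index computation, as a 0-or-1-element list
def pvG (xs : List String) (paths : List (String × Int)) (i : Int) : List (String × Int) :=
  match PySem.List.pyGet? xs i with
  | none => []
  | some li =>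
    let pad := pvIndent li
    match PySem.List.slice? xs (some i) none (-1) with
    | none => []
    | some rev =>
      match (PySem.List.enumerate rev 0).find?
          (fun q => pvIsDevice q.2 && decide (pvIndent q.2 < pad)) with
      | none => []
      | some q =>
        match paths.find? (fun x => x.2 == i - q.1) with
        | some device => [device]
        | none => [(q.2, i - q.1)]

-- B's device-index entry for an enumerated line
def pvEmb (p : Int × String) : String × Int × Nat := (p.2, p.1, pvIndent p.2)

lemma pv_find?_filter {α : Type} (l : List α) (p q : α → Bool) :
    (l.filter q).find? p = l.find? (fun a => q a && p a) := by
  induction l with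
  | nil => rfl
  | cons a l ih => by_cases hq : q a <;> simp [hq, List.find?_cons, ih]

lemma pv_enum_shift {α : Type} (l : List α) :
    ∀ s : Int, PySem.List.enumerate l s = (PySem.List.enumerate l 0).map (fun q => (q.1 + s, q.2)) := by
  induction l with
  | nil => intro s; simp [PySem.List.enumerate_nil]
  | cons a l ih =>
    intro s
    rw [PySem.List.enumerate_cons, PySem.List.enumerate_cons, ih (s+1), ih (0+1)]
    simp [List.map_map, Function.comp]
    intro a b _; omega

lemma pv_enum_take {α : Type} (l : List α) :
    ∀ (n : Nat) (s : Int), (PySem.List.enumerate l s).take n = PySem.List.enumerate (l.take n) s := by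
  induction l with
  | nil => intro n s; simp [PySem.List.enumerate_nil]
  | cons a l ih =>
    intro n s
    cases n with
    | zero => simp [PySem.List.enumerate_nil]
    | succ n => simp [PySem.List.enumerate_cons, ih n (s+1)]

lemma pv_filterMap_range_rev {α : Type} (xs : List α) : ∀ i, i < xs.length →
    (List.range (i+1)).filterMap (fun (x : Nat) => xs[((i:Int) + -((x:Nat):Int)).toNat]?) = (xs.take (i + 1)).reverse := by
  intro i
  induction i with
  | zero => intro h; simp [List.range_succ, List.take_add_one, List.getElem?_eq_getElem h]
  | succ i ih =>
    intro h
    have h1 : i < xs.length := by omega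
    rw [List.range_succ_eq_map, List.filterMap_cons, List.filterMap_map]
    rw [show (fun (x:Nat) => xs[((((i:Nat)+1:Nat):Int) + -((x:Nat):Int)).toNat]?) ∘ Nat.succ = (fun (k : Nat) => xs[((i:Int) + -((k:Nat):Int)).toNat]?) from by
      funext k; simp only [Function.comp]; congr 1; push_cast; omega]
    rw [ih h1]
    rw [show ((((i:Nat)+1 : Nat):Int) + -(((0:Nat):Nat):Int)).toNat = i + 1 from by push_cast; omega]
    rw [List.getElem?_eq_getElem h]
    show xs[i+1] :: (xs.take (i+1)).reverse = (xs.take (i+1+1)).reverse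
    conv_rhs => rw [List.take_add_one (i := i+1), List.getElem?_eq_getElem h]
    simp only [Option.toList_some, List.reverse_append, List.reverse_singleton, List.singleton_append]

lemma pv_slice_rev {α : Type} (xs : List α) (i : Nat) (h : i < xs.length) :
    PySem.List.slice? xs (some (i : Int)) none (-1) = some ((xs.take (i + 1)).reverse) := by
  simp only [PySem.List.slice?, PySem.List.sliceIndices]
  norm_num
  have hi0 : ¬ ((i:Int) < 0) := by omega
  have hmin : min (i:Int) ((xs.length:Int) - 1) = (i:Int) := by omega
  rw [if_neg hi0, hmin]
  have hpos : (-1:Int) < (i:Int) := by omega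
  rw [if_pos hpos]
  rw [show ((i:Int) + 1).toNat = i + 1 from by omega]
  exact pv_filterMap_range_rev xs i h

lemma pv_enum_rev_find {α : Type} (l : List α) (P : α → Bool) :
    (PySem.List.enumerate l.reverse 0).find? (fun q => P q.2)
      = ((PySem.List.enumerate l 0).reverse.find? (fun q => P q.2)).map
          (fun q => ((l.length : Int) - 1 - q.1, q.2)) := by
  induction l with
  | nil => simp [PySem.List.enumerate_nil]
  | cons a l ih =>
    rw [List.reverse_cons, PySem.List.enumerate_append, List.find?_append, ih]
    conv_rhs => rw [PySem.List.enumerate_cons, List.reverse_cons, List.find?_append, pv_enum_shift l (0+1)]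
    rw [← List.map_reverse, List.find?_map]
    conv_lhs => rw [PySem.List.enumerate_cons, PySem.List.enumerate_nil]
    simp only [List.length_reverse, List.find?_cons, List.find?_nil]
    simp only [Function.comp_def]
    by_cases hP : P a
    · cases hF : ((PySem.List.enumerate l 0).reverse.find? (fun q => P q.2)) with
      | none => simp [hP, hF]
      | some q => simp [hP, hF]; omega
    · cases hF : ((PySem.List.enumerate l 0).reverse.find? (fun q => P q.2)) with
      | none => simp [hP, hF]
      | some q => simp [hP, hF]; omega

lemma pv_setdefault_fold_get? (l : List (String × Int)) (d : PySem.Dict Int (String × Int)) (k : Int) :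
    (l.foldl (fun d x => d.setdefault x.2 x) d).get? k = (d.get? k).or (l.find? (fun x => x.2 == k)) := by
  induction l generalizing d with
  | nil => simp
  | cons a l ih =>
    rw [List.foldl_cons, ih, List.find?_cons]
    by_cases hk : a.2 = k
    · subst hk
      rw [PySem.Dict.get?_setdefault_self d a.2 a]
      cases hd : d.get? a.2 <;> simp [hd]
    · rw [PySem.Dict.get?_setdefault_of_ne d a (Ne.symm hk)]
      simp [show (a.2 == k) = false from by simp [hk]]

lemma pv_setdefault_fold_getD (l : List (String × Int)) (k : Int) (dflt : String × Int) :
    (l.foldl (fun d x => d.setdefault x.2 x) PySem.Dict.empty).getD k dflt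
      = ((l.find? (fun x => x.2 == k)).getD dflt) := by
  rw [PySem.Dict.getD_eq_get?_getD, pv_setdefault_fold_get?, PySem.Dict.get?_empty]
  rfl

-- A's result in closed form
lemma pv_A_eq (xs : List String) (paths : List (String × Int)) (hid : String) :
    get_device_paths_with_hid xs paths hid
      = (((PySem.List.enumerate xs 0).filter
            (fun p => !pvIsHex p.2 && PySem.Str.isIn (PySem.Str.upper hid) (PySem.Str.upper p.2))).map (·.1)).flatMap
          (pvG xs paths) := by
  unfold get_device_paths_with_hid
  rw [show (fun (acc : List Int) (p : Int × String) =>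
        if pvIsHex p.2 then acc
        else if PySem.Str.isIn (PySem.Str.upper hid) (PySem.Str.upper p.2) then acc ++ [p.1]
        else acc)
      = (fun acc p => if (!pvIsHex p.2 && PySem.Str.isIn (PySem.Str.upper hid) (PySem.Str.upper p.2)) then acc ++ [p.1] else acc) from by
    funext acc p
    by_cases h1 : pvIsHex p.2 <;> by_cases h2 : PySem.Str.isIn (PySem.Str.upper hid) (PySem.Str.upper p.2) <;> simp [h1, h2]]
  rw [PySem.List.foldl_append_if]
  rw [show (fun (devices : List (String × Int)) (i : Int) =>
      match PySem.List.pyGet? xs i with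
      | none => devices
      | some li =>
        let pad := pvIndent li
        match PySem.List.slice? xs (some i) none (-1) with
        | none => devices
        | some rev =>
          match (PySem.List.enumerate rev 0).find?
              (fun q => pvIsDevice q.2 && decide (pvIndent q.2 < pad)) with
          | none => devices
          | some q =>
            match paths.find? (fun x => x.2 == i - q.1) with
            | some device => devices ++ [device]
            | none => devices ++ [(q.2, i - q.1)])
      = fun devices i => devices ++ pvG xs paths i from by
    funext devices i
    unfold pvG
    cases hg : PySem.List.pyGet? xs i with
    | none => simp
    | some li =>
      simp only []
      cases hs : PySem.List.slice? xs (some i) none (-1) with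
      | none => simp
      | some rev =>
        simp only []
        cases hf : (PySem.List.enumerate rev 0).find?
            (fun q => pvIsDevice q.2 && decide (pvIndent q.2 < pvIndent li)) with
        | none => simp [hf]
        | some q =>
          simp only [hf]
          cases hp : paths.find? (fun x => x.2 == i - q.1) <;> simp [hp]]
  dsimp only
  rw [PySem.List.foldl_append_eq_flatMap]
  simp only [List.nil_append]
  by_cases he : ((((PySem.List.enumerate xs 0).filter
        (fun p => !pvIsHex p.2 && PySem.Str.isIn (PySem.Str.upper hid) (PySem.Str.upper p.2))).map (fun x => x.1))).isEmpty
  · rw [if_pos he]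
    rw [List.isEmpty_iff] at he
    rw [he]
    simp
  · rw [if_neg he]

-- the per-index equivalence: B's query over the device index = A's backward scan
lemma pv_step_eq (xs : List String) (paths : List (String × Int)) (n : Nat) (h : n < xs.length) :
    (match ((((PySem.List.enumerate xs 0).take n).filter (fun p => pvIsDevice p.2)).map pvEmb).reverse.find?
        (fun d => decide (d.2.2 < pvIndent xs[n])) with
     | some d => [(paths.foldl (fun d x => d.setdefault x.2 x) PySem.Dict.empty).getD d.2.1 (d.1, d.2.1)]
     | none => ([] : List (String × Int)))
    = pvG xs paths (n : Int) := by
  have hx : PySem.List.pyGet? xs ((n:Nat) : Int) = some xs[n] := by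
    rw [PySem.List.pyGet?_natCast]; exact List.getElem?_eq_getElem h
  unfold pvG
  rw [hx, pv_slice_rev xs n h]
  simp only []
  rw [pv_enum_rev_find (xs.take (n+1)) (fun s => pvIsDevice s && decide (pvIndent s < pvIndent xs[n]))]
  have hlen : (xs.take (n+1)).length = n + 1 := by rw [List.length_take]; omega
  rw [hlen]
  rw [← pv_enum_take xs (n+1) 0]
  have htk : (PySem.List.enumerate xs 0).take (n+1)
      = (PySem.List.enumerate xs 0).take n ++ [((n:Int), xs[n])] := by
    rw [List.take_add_one]
    congr 1
    rw [PySem.List.getElem?_enumerate, List.getElem?_eq_getElem h]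
    simp
  rw [htk, List.reverse_append, List.reverse_singleton, List.singleton_append, List.find?_cons]
  have hhead : (pvIsDevice ((n:Int), xs[n]).2 && decide (pvIndent ((n:Int), xs[n]).2 < pvIndent xs[n])) = false := by
    simp
  rw [hhead]
  rw [← List.map_reverse, List.find?_map, ← List.filter_reverse, pv_find?_filter]
  rw [show (fun (a : Int × String) => pvIsDevice a.2 && ((fun (d : String × Int × Nat) => decide (d.2.2 < pvIndent xs[n])) ∘ pvEmb) a)
      = (fun (q : Int × String) => pvIsDevice q.2 && decide (pvIndent q.2 < pvIndent xs[n])) from by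
    funext a
    simp only [Function.comp_apply, pvEmb]
    congr 1]
  cases hF : List.find? (fun q => pvIsDevice q.2 && decide (pvIndent q.2 < pvIndent xs[n]))
      ((PySem.List.enumerate xs 0).take n).reverse with
  | none => simp [hF]
  | some q =>
    simp only [hF, Option.map_some, pvEmb]
    rw [show ((↑(n + 1) : Int) - 1 - q.1) = ↑n - q.1 from by push_cast; ring]
    rw [show ((n:Int) - ((n:Int) - q.1)) = q.1 from by ring]
    rw [pv_setdefault_fold_getD]
    cases hp : paths.find? (fun x => x.2 == q.1) <;> simp [hp]

-- the forward-pass invariant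
lemma pv_B_inv (xs : List String) (paths : List (String × Int)) (hid : String) :
    ∀ n, n ≤ xs.length →
    (((PySem.List.enumerate xs 0).take n).foldl
      (fun st p =>
        let indent := pvIndent p.2
        let out :=
          if PySem.Str.isIn (PySem.Str.upper hid) (PySem.Str.upper p.2) && !pvIsHex p.2 then
            match st.1.reverse.find? (fun d => decide (d.2.2 < indent)) with
            | some d => st.2 ++ [(paths.foldl (fun d x => d.setdefault x.2 x) PySem.Dict.empty).getD d.2.1 (d.1, d.2.1)]
            | none => st.2
          else st.2
        let devs := if pvIsDevice p.2 then st.1 ++ [(p.2, p.1, indent)] else st.1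
        (devs, out))
      (([] : List (String × Int × Nat)), ([] : List (String × Int))))
    = ( (((PySem.List.enumerate xs 0).take n).filter (fun p => pvIsDevice p.2)).map pvEmb,
        (((PySem.List.enumerate xs 0).take n).filter
          (fun p => !pvIsHex p.2 && PySem.Str.isIn (PySem.Str.upper hid) (PySem.Str.upper p.2))).flatMap
          (fun p => pvG xs paths p.1) ) := by
  intro n
  induction n with
  | zero => intro _; simp
  | succ n ih =>
    intro h
    have hn : n ≤ xs.length := by omega
    have hlt : n < xs.length := by omega
    have htk : (PySem.List.enumerate xs 0).take (n+1)
        = (PySem.List.enumerate xs 0).take n ++ [((n:Int), xs[n])] := by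
      rw [List.take_add_one]
      congr 1
      rw [PySem.List.getElem?_enumerate, List.getElem?_eq_getElem hlt]
      simp
    rw [htk, List.foldl_append, ih hn]
    rw [List.filter_append, List.filter_append, List.map_append, List.flatMap_append]
    simp only [List.foldl_cons, List.foldl_nil]
    refine Prod.ext ?_ ?_
    · by_cases hD : pvIsDevice xs[n] <;>
        simp [hD, pvEmb, List.filter_cons]
    · by_cases hH : pvIsHex xs[n] <;>
        by_cases hM : PySem.Str.isIn (PySem.Str.upper hid) (PySem.Str.upper xs[n])
      · simp only [hH, hM, List.filter_cons, Bool.not_true, Bool.not_false, Bool.and_false, Bool.false_and, Bool.and_true, Bool.true_and, if_false, if_true, Bool.false_eq_true, List.filter_nil, List.flatMap_nil, List.append_nil]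
      · simp only [hH, hM, List.filter_cons, Bool.not_true, Bool.not_false, Bool.and_false, Bool.false_and, Bool.and_true, Bool.true_and, if_false, if_true, Bool.false_eq_true, List.filter_nil, List.flatMap_nil, List.append_nil]
      · -- the one real case: the line is a HID match
        simp only [hH, hM, List.filter_cons]
        simp only [Bool.not_false, Bool.and_true, Bool.true_and, if_true, List.filter_nil,
          List.flatMap_cons, List.flatMap_nil, List.append_nil]
        rw [← pv_step_eq xs paths n hlt]
        cases hq : ((((PySem.List.enumerate xs 0).take n).filter (fun p => pvIsDevice p.2)).map pvEmb).reverse.find?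
            (fun d => decide (d.2.2 < pvIndent xs[n])) with
        | none => simp [hq]
        | some d => simp [hq]
      · simp only [hH, hM, List.filter_cons, Bool.not_true, Bool.not_false, Bool.and_false, Bool.false_and, Bool.and_true, Bool.true_and, if_false, if_true, Bool.false_eq_true, List.filter_nil, List.flatMap_nil, List.append_nil]

-- ===== VERDICT (by name: the statement is the Claim_ definition above) =====
theorem get_device_paths_with_hid_spec : Claim_equal_get_device_paths_with_hid := by
  intro xs paths hid _
  unfold Spec_get_device_paths_with_hid
  rw [pv_A_eq]
  unfold get_device_paths_with_hid_alt
  have hInv := pv_B_inv xs paths hid xs.length (le_refl _)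
  rw [show (PySem.List.enumerate xs 0).take xs.length = PySem.List.enumerate xs 0 from by
    conv_lhs => rw [← PySem.List.length_enumerate xs 0]
    exact List.take_length] at hInv
  dsimp only
  rw [hInv]
  rw [List.flatMap_map]
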